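-- pv_equiv track=rewrite | github.com/maxrusse/RadIMO_SBZ_dev | app.py | apply_roster_overrides
-- ===== SOURCE A (Python) =====
-- def apply_roster_overrides(
--     base_skills: dict,
--     canonical_id: str,
--     modality: str,
--     worker_roster: dict
-- ) -> dict:
--     """Apply per-worker skill overrides from config.yaml worker_skill_roster."""
--     if canonical_id not in worker_roster:
--         return base_skills.copy()
--
--     final_skills = base_skills.copy()
--
--     # Apply default overrides
--     if 'default' in worker_roster[canonical_id]:
--         for skill, value in worker_roster[canonical_id]['default'].items():
--             if skill in final_skills:
--                 final_skills[skill] = value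
--
--     # Apply modality-specific overrides
--     if modality in worker_roster[canonical_id]:
--         for skill, value in worker_roster[canonical_id][modality].items():
--             if skill in final_skills:
--                 final_skills[skill] = value
--
--     return final_skills
-- ===== SOURCE B (Python) =====
-- def apply_roster_overrides(
--     base_skills: dict,
--     canonical_id: str,
--     modality: str,
--     worker_roster: dict
-- ) -> dict:
--     """Apply per-worker skill overrides from config.yaml worker_skill_roster."""
--     if canonical_id not in worker_roster:
--         return base_skills.copy()
--
--     entry = worker_roster[canonical_id]
--     # One merged override table: defaults first, modality-specific on top.
--     overrides = {}
--     overrides.update(entry.get('default', {}))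
--     overrides.update(entry.get(modality, {}))
--
--     # Single pass over the base skills; only skills already present get overridden.
--     return {skill: overrides.get(skill, value) for skill, value in base_skills.items()}
-- ===== Notes on version B (the rewrite author's own statement) =====
-- stated objective: simpler
-- what changed: Instead of two guarded in-place scans over the override sub-dicts that mutate a copied base dict, B merges default and modality overrides into one table and rebuilds the result in a single comprehension pass over base_skills.
import Mathlib
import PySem

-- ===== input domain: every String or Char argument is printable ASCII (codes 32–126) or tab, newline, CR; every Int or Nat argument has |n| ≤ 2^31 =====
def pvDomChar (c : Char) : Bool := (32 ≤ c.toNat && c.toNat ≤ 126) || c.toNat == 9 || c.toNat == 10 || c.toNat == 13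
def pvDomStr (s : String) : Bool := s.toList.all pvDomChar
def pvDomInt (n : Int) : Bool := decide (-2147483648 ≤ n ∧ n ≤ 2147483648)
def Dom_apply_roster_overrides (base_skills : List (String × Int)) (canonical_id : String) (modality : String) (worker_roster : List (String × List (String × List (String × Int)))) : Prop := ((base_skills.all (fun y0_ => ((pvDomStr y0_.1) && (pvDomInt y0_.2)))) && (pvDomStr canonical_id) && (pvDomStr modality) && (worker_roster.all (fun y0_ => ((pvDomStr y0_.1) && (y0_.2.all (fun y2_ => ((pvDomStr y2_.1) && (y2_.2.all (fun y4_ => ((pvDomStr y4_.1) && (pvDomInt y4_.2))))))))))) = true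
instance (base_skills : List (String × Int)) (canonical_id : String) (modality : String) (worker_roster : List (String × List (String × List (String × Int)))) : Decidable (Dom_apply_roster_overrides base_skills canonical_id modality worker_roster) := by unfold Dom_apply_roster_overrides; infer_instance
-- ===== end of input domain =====

-- B replaces A's two guarded in-place scans over the override sub-dicts by one merged
-- override table followed by a single rebuilding pass over base_skills (objective: simpler).

-- ===== PORT A =====
-- the body of A's two identical "for skill, value in ….items(): if skill in final_skills: final_skills[skill] = value" loops
def pvApplyIfPresent (fs : PySem.Dict String Int) (ov : List (String × Int)) : PySem.Dict String Int :=
  ov.foldl (fun fs sv => if fs.contains sv.1 then fs.insert sv.1 sv.2 else fs) fs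

def apply_roster_overrides (base_skills : List (String × Int)) (canonical_id : String) (modality : String) (worker_roster : List (String × List (String × List (String × Int)))) : List (String × Int) :=
  let rosterD := PySem.Dict.mk worker_roster
  if rosterD.contains canonical_id then
    let entryD := PySem.Dict.mk (rosterD.getD canonical_id [])   -- worker_roster[canonical_id] (the guard ensures presence)
    let fs0 := PySem.Dict.mk base_skills                          -- final_skills = base_skills.copy()
    let fs1 := if entryD.contains "default" then pvApplyIfPresent fs0 (entryD.getD "default" []) else fs0
    let fs2 := if entryD.contains modality then pvApplyIfPresent fs1 (entryD.getD modality []) else fs1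
    fs2.items
  else base_skills                                                -- early "return base_skills.copy()"

-- ===== PORT B =====
-- "overrides.update(pairs)"
def pvInsAll (d : PySem.Dict String Int) (ov : List (String × Int)) : PySem.Dict String Int :=
  ov.foldl (fun d sv => d.insert sv.1 sv.2) d

def apply_roster_overrides_alt (base_skills : List (String × Int)) (canonical_id : String) (modality : String) (worker_roster : List (String × List (String × List (String × Int)))) : List (String × Int) :=
  match (PySem.Dict.mk worker_roster).get? canonical_id with
  | none => base_skills                                           -- base_skills.copy()
  | some entry =>
    let entryD := PySem.Dict.mk entry
    let ov1 := pvInsAll PySem.Dict.empty (entryD.getD "default" [])   -- overrides.update(entry.get('default', {}))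
    let ov2 := pvInsAll ov1 (entryD.getD modality [])                 -- overrides.update(entry.get(modality, {}))
    base_skills.map (fun sv => (sv.1, ov2.getD sv.1 sv.2))        -- the dict comprehension over base_skills

-- ===== PRECONDITION & SPEC =====
def Spec_apply_roster_overrides (base_skills : List (String × Int)) (canonical_id : String) (modality : String) (worker_roster : List (String × List (String × List (String × Int)))) (out : List (String × Int)) : Prop := out = apply_roster_overrides_alt base_skills canonical_id modality worker_roster
instance (base_skills : List (String × Int)) (canonical_id : String) (modality : String) (worker_roster : List (String × List (String × List (String × Int)))) (out : List (String × Int)) : Decidable (Spec_apply_roster_overrides base_skills canonical_id modality worker_roster out) := by unfold Spec_apply_roster_overrides; infer_instance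

-- ===== CLAIM (what is proved, stated in full; the proofs are below) =====
def Claim_equal_apply_roster_overrides : Prop := ∀ (base_skills : List (String × Int)) (canonical_id : String) (modality : String) (worker_roster : List (String × List (String × List (String × Int)))), Dom_apply_roster_overrides base_skills canonical_id modality worker_roster → Spec_apply_roster_overrides base_skills canonical_id modality worker_roster (apply_roster_overrides base_skills canonical_id modality worker_roster)

-- ===== LEMMAS AND PROOFS =====

-- the value key k holds after a last-write-wins sweep over L, starting from d
def pvLast (L : List (String × Int)) (k : String) (d : Int) : Int :=
  L.foldl (fun acc sv => if sv.1 == k then sv.2 else acc) d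

theorem pvLast_cons (sv : String × Int) (L : List (String × Int)) (k : String) (d : Int) :
    pvLast (sv :: L) k d = pvLast L k (if sv.1 == k then sv.2 else d) := rfl

theorem pvLast_append (L1 L2 : List (String × Int)) (k : String) (d : Int) :
    pvLast (L1 ++ L2) k d = pvLast L2 k (pvLast L1 k d) := by
  simp [pvLast, List.foldl_append]

theorem pvApplyIfPresent_append (d : PySem.Dict String Int) (L1 L2 : List (String × Int)) :
    pvApplyIfPresent d (L1 ++ L2) = pvApplyIfPresent (pvApplyIfPresent d L1) L2 := by
  simp [pvApplyIfPresent, List.foldl_append]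

theorem pvInsAll_append (d : PySem.Dict String Int) (L1 L2 : List (String × Int)) :
    pvInsAll d (L1 ++ L2) = pvInsAll (pvInsAll d L1) L2 := by
  simp [pvInsAll, List.foldl_append]

-- A's guarded in-place loop, characterised pointwise over the base items
theorem pvApplyIfPresent_items (L fs : List (String × Int)) :
    (pvApplyIfPresent (PySem.Dict.mk fs) L).items
      = fs.map (fun p => (p.1, pvLast L p.1 p.2)) := by
  induction L generalizing fs with
  | nil => simp [pvApplyIfPresent, pvLast]
  | cons sv L ih =>
    by_cases h : (PySem.Dict.mk fs).contains sv.1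
    · have hins : (PySem.Dict.mk fs).insert sv.1 sv.2
          = PySem.Dict.mk (fs.map fun p => if p.1 == sv.1 then (sv.1, sv.2) else p) := by
        apply PySem.Dict.ext
        simpa using PySem.Dict.items_insert_of_contains _ sv.2 h
      have hstep : pvApplyIfPresent (PySem.Dict.mk fs) (sv :: L)
          = pvApplyIfPresent (PySem.Dict.mk (fs.map fun p => if p.1 == sv.1 then (sv.1, sv.2) else p)) L := by
        simp [pvApplyIfPresent, h, hins]
      rw [hstep, ih, List.map_map]
      refine List.map_congr_left (fun p _ => ?_)
      by_cases hk : p.1 = sv.1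
      · simp [Function.comp, hk, pvLast_cons]
      · have h1 : (p.1 == sv.1) = false := by simp [hk]
        have h2 : (sv.1 == p.1) = false := by
          simp only [beq_eq_false_iff_ne, ne_eq]
          exact fun h' => hk h'.symm
        simp [Function.comp, h1, h2, pvLast_cons]
    · have hstep : pvApplyIfPresent (PySem.Dict.mk fs) (sv :: L)
          = pvApplyIfPresent (PySem.Dict.mk fs) L := by
        simp [pvApplyIfPresent, h]
      rw [hstep, ih]
      refine List.map_congr_left (fun p hp => ?_)
      have hno : ¬ p.1 = sv.1 := by
        intro hmeq
        apply h
        rw [PySem.Dict.contains_mk]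
        exact List.any_eq_true.mpr ⟨p, hp, by simp [hmeq]⟩
      have h2 : (sv.1 == p.1) = false := by
        simp only [beq_eq_false_iff_ne, ne_eq]
        exact fun h' => hno h'.symm
      simp [h2, pvLast_cons]

-- B's merged override table, characterised pointwise
theorem pvInsAll_getD (L : List (String × Int)) (d0 : PySem.Dict String Int) (k : String) (d : Int) :
    (pvInsAll d0 L).getD k d = pvLast L k (d0.getD k d) := by
  induction L generalizing d0 with
  | nil => rfl
  | cons sv L ih =>
    have : pvInsAll d0 (sv :: L) = pvInsAll (d0.insert sv.1 sv.2) L := rfl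
    rw [this, ih, pvLast_cons, PySem.Dict.getD_insert]
    by_cases hk : k = sv.1
    · simp [hk]
    · have : (sv.1 == k) = false := beq_eq_false_iff_ne.mpr (fun h' => hk h'.symm)
      simp [hk, this]

-- collapse A's 'if key in entry' guards: a missing key contributes the empty override list
theorem pvGuard_collapse (entryD : PySem.Dict String (List (String × Int))) (key : String)
    (fs : PySem.Dict String Int) :
    (if entryD.contains key then pvApplyIfPresent fs (entryD.getD key []) else fs)
      = pvApplyIfPresent fs (entryD.getD key []) := by
  by_cases hc : entryD.contains key
  · simp [hc]
  · simp [hc, PySem.Dict.getD_of_not_contains _ _ (by simpa using hc), pvApplyIfPresent]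

-- ===== VERDICT (by name: the statement is the Claim_ definition above) =====
theorem apply_roster_overrides_spec : Claim_equal_apply_roster_overrides := by
  intro base_skills canonical_id modality worker_roster _
  unfold Spec_apply_roster_overrides apply_roster_overrides apply_roster_overrides_alt
  cases h : (PySem.Dict.mk worker_roster).get? canonical_id with
  | none =>
    have hc : (PySem.Dict.mk worker_roster).contains canonical_id = false := by
      rw [PySem.Dict.contains_eq_isSome_get?, h]; rfl
    simp [hc]
  | some entry =>
    have hc : (PySem.Dict.mk worker_roster).contains canonical_id = true := by
      rw [PySem.Dict.contains_eq_isSome_get?, h]; rfl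
    have hentry : (PySem.Dict.mk worker_roster).getD canonical_id [] = entry :=
      PySem.Dict.getD_of_get?_eq_some _ _ h
    simp only [hc, if_true, hentry]
    rw [pvGuard_collapse, pvGuard_collapse, ← pvApplyIfPresent_append, pvApplyIfPresent_items,
        ← pvInsAll_append]
    refine List.map_congr_left (fun p _ => ?_)
    rw [pvInsAll_getD, PySem.Dict.getD_empty, pvLast_append]
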